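-- pv_equiv track=rewrite | github.com/kimsang-kyu/programmers | 신규 아이디 추천.py | solution
-- ===== SOURCE A (Python) =====
-- def solution(new_id):
--     #1
--     new_id = new_id.lower()
--
--     #2
--     new_id2 = ''
--     for id in new_id:
--         if id.isalpha() or id.isdigit() or id in ['-', '_','.']:
--             new_id2+=id
--
--     #3
--     while '..' in new_id2:
--         new_id2 = new_id2.replace('..', '.')
--
--     #4
--     new_id = new_id2.strip(".")
--
--     #5
--     if len(new_id) == 0:
--         new_id = new_id.replace("",'a')
--
--     #6
--     if len(new_id) > 15:
--         new_id = new_id[:15]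
--         new_id = new_id.strip(".")
--     else:
--         new_id = new_id
--
--     #7
--     if len(new_id) <= 2:
--         while True:
--             new_id = new_id + new_id[-1]
--             if len(new_id) >= 3:
--                 break
--
--     return new_id
-- ===== SOURCE B (Python) =====
-- def solution(new_id):
--     # one pass: filter allowed chars and collapse consecutive dots on the fly
--     out = []
--     prev_dot = False
--     for ch in new_id.lower():
--         if ch.isalpha() or ch.isdigit() or ch in '-_.':
--             if ch == '.':
--                 if not prev_dot:
--                     out.append('.')
--                 prev_dot = True
--             else:
--                 out.append(ch)
--                 prev_dot = False
--     t = ''.join(out).strip('.')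
--     if not t:
--         t = 'a'
--     if len(t) > 15:
--         t = t[:15].strip('.')
--     if len(t) <= 2:
--         t += t[-1] * (3 - len(t))
--     return t
-- ===== Notes on version B (the rewrite author's own statement) =====
-- stated objective: alternative
-- what changed: Replaces A's separate filter pass plus repeated whole-string replace rescans for collapsing consecutive dots with a single pass that filters and collapses dot runs on the fly via a prev-dot flag (list append + join instead of string concatenation, arithmetic padding instead of a while loop).
import Mathlib
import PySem

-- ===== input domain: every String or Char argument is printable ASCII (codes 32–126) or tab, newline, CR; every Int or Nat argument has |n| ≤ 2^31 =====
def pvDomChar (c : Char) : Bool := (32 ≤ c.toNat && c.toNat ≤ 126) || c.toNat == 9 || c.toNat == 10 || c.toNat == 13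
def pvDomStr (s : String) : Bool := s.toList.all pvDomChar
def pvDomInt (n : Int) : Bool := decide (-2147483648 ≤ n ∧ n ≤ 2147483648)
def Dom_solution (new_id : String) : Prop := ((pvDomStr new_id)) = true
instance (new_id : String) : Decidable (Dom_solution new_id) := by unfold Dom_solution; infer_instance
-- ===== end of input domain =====

-- B filters and collapses dot runs in a single pass with a prev-dot flag instead of
-- A's filter pass plus repeated "while '..' in s: replace" rescans; same result, proved equal.

-- ===== PORT A =====
def pvKeepA (c : Char) : Bool := PySem.Chars.isalpha c || PySem.Chars.isdigit c || ['-', '_', '.'].contains c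

-- The following block (up to pvReplaceDotsLen) exists only because A's while-loop port
-- needs a termination argument, which the port cites by name in its decreasing_by.
def pvRep : List Char → List Char
  | [] => []
  | [c] => [c]
  | c :: d :: t => if c = '.' ∧ d = '.' then '.' :: pvRep t else c :: pvRep (d :: t)

theorem pvRep_go (fuel : Nat) : ∀ (l acc : List Char), l.length ≤ fuel →
    PySem.Chars.replace.go ['.', '.'] ['.'] fuel l acc = acc.reverse ++ pvRep l := by
  induction fuel with
  | zero =>
    intro l acc h
    have : l = [] := List.eq_nil_of_length_eq_zero (Nat.le_zero.mp h)
    subst this; simp [PySem.Chars.replace.go, pvRep]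
  | succ n ih =>
    intro l acc h
    match l with
    | [] => simp [PySem.Chars.replace.go, pvRep]
    | [c] =>
      have hpre : List.isPrefixOf ['.', '.'] [c] = false := by
        simp [List.isPrefixOf]
      rw [PySem.Chars.replace.go]
      simp only [hpre]
      rw [ih [] (c :: acc) (by simp)]
      simp [pvRep]
    | c :: d :: t =>
      by_cases hdd : c = '.' ∧ d = '.'
      · obtain ⟨hc, hd⟩ := hdd; subst hc; subst hd
        have hpre : List.isPrefixOf ['.', '.'] ('.' :: '.' :: t) = true := by
          simp [List.isPrefixOf]
        rw [PySem.Chars.replace.go]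
        simp only [hpre, if_true]
        rw [ih _ _ (by simp at h ⊢; omega)]
        simp [pvRep]
      · have hpre : List.isPrefixOf ['.', '.'] (c :: d :: t) = false := by
          simp [List.isPrefixOf]
          intro hc hd; exact hdd ⟨hc.symm, hd.symm⟩
        rw [PySem.Chars.replace.go]
        simp only [hpre]
        rw [ih (d :: t) (c :: acc) (by simp at h ⊢; omega)]
        simp [pvRep, hdd]

theorem pvRep_eq (s : List Char) : PySem.Chars.replace s ['.', '.'] ['.'] = pvRep s := by
  rw [PySem.Chars.replace]
  simp only [List.isEmpty]
  exact pvRep_go s.length s [] (le_refl _)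

theorem pvRep_length_le (s : List Char) : (pvRep s).length ≤ s.length := by
  induction s using pvRep.induct with
  | case1 => simp [pvRep]
  | case2 c => simp [pvRep]
  | case3 c d t hdd ih => simp [pvRep, hdd]; omega
  | case4 c d t hdd ih => simp [pvRep, hdd] at ih ⊢; omega

theorem pvRep_length_lt (s : List Char) (h : ['.', '.'] <:+: s) : (pvRep s).length < s.length := by
  induction s using pvRep.induct with
  | case1 => simp at h
  | case2 c => have := h.length_le; simp at this
  | case3 c d t hdd ih =>
    have := pvRep_length_le t
    simp [pvRep, hdd]; omega
  | case4 c d t hdd ih =>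
    rcases List.infix_cons_iff.mp h with hp | hi
    · rcases hp with ⟨r, hr⟩
      simp at hr
      exact absurd ⟨hr.1.symm, hr.2.1.symm⟩ hdd
    · have := ih hi
      simp [pvRep, hdd] at this ⊢
      omega

theorem pvReplaceDotsLen (s : List Char) (h : PySem.Chars.isIn ['.', '.'] s = true) :
    (PySem.Chars.replace s ['.', '.'] ['.']).length < s.length := by
  rw [pvRep_eq]
  exact pvRep_length_lt s ((PySem.Chars.isIn_iff_infix _ _).mp h)

-- while '..' in new_id2: new_id2 = new_id2.replace('..', '.')
def pvRepLoop (s : List Char) : List Char :=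
  if h : PySem.Chars.isIn ['.', '.'] s = true then
    pvRepLoop (PySem.Chars.replace s ['.', '.'] ['.'])
  else s
termination_by s.length
decreasing_by exact pvReplaceDotsLen s h

-- while True: new_id = new_id + new_id[-1]; if len(new_id) >= 3: break
-- (the fuel only bounds the iteration count — the loop runs at most twice; the none
--  branch of pyGet? is Python's IndexError, unreachable here since the list is nonempty)
def pvPadLoop (s : List Char) : Nat → List Char
  | 0 => s
  | fuel + 1 =>
    let s' := s ++ (match PySem.List.pyGet? s (-1) with | some c => [c] | none => [])
    if 3 ≤ s'.length then s' else pvPadLoop s' fuel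

def solution (new_id : String) : String :=
  let s1 := PySem.Chars.lower new_id.toList
  let s2 := s1.foldl (fun acc c => if pvKeepA c then acc ++ [c] else acc) []
  let s3 := pvRepLoop s2
  let s4 := PySem.Chars.stripChars s3 ['.']
  let s5 := if s4.length = 0 then PySem.Chars.replace s4 [] ['a'] else s4
  let s6 := if 15 < s5.length then
              PySem.Chars.stripChars (PySem.List.slice s5 none (some 15)) ['.']
            else s5
  let s7 := if s6.length ≤ 2 then pvPadLoop s6 3 else s6
  String.ofList s7

-- ===== PORT B =====
-- one fold = B's single for-loop: state (collected chars, previous char was a dot)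
-- t[-1]: Python would raise IndexError on an empty list, unreachable here (t2 is nonempty)
def solution_alt (new_id : String) : String :=
  let p := (PySem.Chars.lower new_id.toList).foldl
      (fun (st : List Char × Bool) ch =>
        if PySem.Chars.isalpha ch || PySem.Chars.isdigit ch || ['-', '_', '.'].contains ch then
          if ch = '.' then
            ((if st.2 then st.1 else st.1 ++ ['.']), true)
          else (st.1 ++ [ch], false)
        else st) ([], false)
  let t0 := PySem.Chars.stripChars p.1 ['.']
  let t1 := if t0.length = 0 then ['a'] else t0
  let t2 := if 15 < t1.length then
              PySem.Chars.stripChars (PySem.List.slice t1 none (some 15)) ['.']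
            else t1
  let t3 := if t2.length ≤ 2 then
              t2 ++ List.replicate (3 - t2.length)
                (match PySem.List.pyGet? t2 (-1) with | some c => c | none => 'a')
            else t2
  String.ofList t3

-- ===== PRECONDITION & SPEC =====
def Spec_solution (new_id : String) (out : String) : Prop := out = solution_alt new_id
instance (new_id : String) (out : String) : Decidable (Spec_solution new_id out) := by unfold Spec_solution; infer_instance

-- ===== CLAIM (what is proved, stated in full; the proofs are below) =====
def Claim_equal_solution : Prop := ∀ (new_id : String), Dom_solution new_id → Spec_solution new_id (solution new_id)

-- ===== LEMMAS AND PROOFS =====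

-- the fully dot-collapsed string: common normal form of both programs' middle stage
def pvCol : List Char → List Char
  | [] => []
  | [c] => [c]
  | c :: d :: t => if c = '.' ∧ d = '.' then pvCol (d :: t) else c :: pvCol (d :: t)

theorem pvCol_cons_ne (c : Char) (t : List Char) (hc : c ≠ '.') : pvCol (c :: t) = c :: pvCol t := by
  cases t with
  | nil => simp [pvCol]
  | cons d t' => simp [pvCol, hc]

theorem pvRep_cons_head (d : Char) (t : List Char) : ∃ r, pvRep (d :: t) = d :: r := by
  cases t with
  | nil => exact ⟨[], rfl⟩
  | cons e t' =>
    by_cases h : d = '.' ∧ e = '.'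
    · exact ⟨pvRep t', by simp [pvRep, h]⟩
    · exact ⟨pvRep (e :: t'), by simp [pvRep, h]⟩

theorem pvCol_rep (s : List Char) :
    pvCol (pvRep s) = pvCol s ∧ pvCol ('.' :: pvRep s) = pvCol ('.' :: s) := by
  induction s using pvRep.induct with
  | case1 => exact ⟨rfl, rfl⟩
  | case2 c => exact ⟨rfl, rfl⟩
  | case3 c d t hdd ih =>
    obtain ⟨hc, hd⟩ := hdd; subst hc; subst hd
    have h1 : pvRep ('.' :: '.' :: t) = '.' :: pvRep t := by simp [pvRep]
    constructor
    · rw [h1, ih.2]; simp [pvCol]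
    · rw [h1]
      show pvCol ('.' :: '.' :: pvRep t) = _
      have e1 : pvCol ('.' :: '.' :: pvRep t) = pvCol ('.' :: pvRep t) := by simp [pvCol]
      rw [e1, ih.2]; simp [pvCol]
  | case4 c d t hdd ih =>
    have h1 : pvRep (c :: d :: t) = c :: pvRep (d :: t) := by simp [pvRep, hdd]
    obtain ⟨r, hr⟩ := pvRep_cons_head d t
    have part1 : pvCol (pvRep (c :: d :: t)) = pvCol (c :: d :: t) := by
      rw [h1, hr]
      show pvCol (c :: d :: r) = _
      simp only [pvCol, if_neg hdd]
      rw [← hr, ih.1]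
    refine ⟨part1, ?_⟩
    by_cases hc : c = '.'
    · subst hc
      have hd : d ≠ '.' := fun hd => hdd ⟨rfl, hd⟩
      rw [h1, hr]
      have e1 : pvCol ('.' :: '.' :: d :: r) = pvCol ('.' :: d :: r) := by simp [pvCol]
      have e2 : pvCol ('.' :: '.' :: d :: t) = pvCol ('.' :: d :: t) := by simp [pvCol]
      rw [e1, e2]
      have e3 : pvCol ('.' :: d :: r) = '.' :: pvCol (d :: r) := by simp [pvCol, hd]
      have e4 : pvCol ('.' :: d :: t) = '.' :: pvCol (d :: t) := by simp [pvCol, hd]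
      rw [e3, e4, ← hr, ih.1]
    · rw [h1]
      have e1 : pvCol ('.' :: c :: pvRep (d :: t)) = '.' :: pvCol (c :: pvRep (d :: t)) := by
        cases hg : pvRep (d :: t) with
        | nil => simp [pvCol, hc]
        | cons x xs => simp [pvCol, hc]
      have e2 : pvCol ('.' :: c :: d :: t) = '.' :: pvCol (c :: d :: t) := by simp [pvCol, hc]
      rw [e1, e2, ← h1, part1]

theorem pvCol_of_no_dd (s : List Char) (h : ¬ ['.', '.'] <:+: s) : pvCol s = s := by
  induction s using pvCol.induct with
  | case1 => rfl
  | case2 c => rfl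
  | case3 c d t hdd ih =>
    obtain ⟨hc, hd⟩ := hdd; subst hc; subst hd
    exact absurd (⟨[], t, by simp⟩ : ['.', '.'] <:+: ('.' :: '.' :: t)) h
  | case4 c d t hdd ih =>
    have : ¬ ['.', '.'] <:+: (d :: t) := fun hi => h (List.infix_cons_iff.mpr (Or.inr hi))
    simp [pvCol, hdd, ih this]

theorem pvRepLoop_eq (s : List Char) : pvRepLoop s = pvCol s := by
  rw [pvRepLoop]
  split
  · next h =>
    rw [pvRep_eq]
    rw [pvRepLoop_eq (pvRep s)]
    exact (pvCol_rep s).1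
  · next h =>
    exact (pvCol_of_no_dd s ((PySem.Chars.isIn_eq_false_iff _ _).mp (by simpa using h))).symm
termination_by s.length
decreasing_by exact pvRep_length_lt s ((PySem.Chars.isIn_iff_infix _ _).mp ‹_›)

-- B's one-pass state machine, restricted to the already-filtered characters
def pvG : List Char → Bool → List Char
  | [], _ => []
  | c :: t, pd =>
    if c = '.' then (if pd then pvG t true else '.' :: pvG t true) else c :: pvG t false

theorem pvG_eq_col (l : List Char) : pvG l false = pvCol l ∧ '.' :: pvG l true = pvCol ('.' :: l) := by
  induction l with
  | nil => exact ⟨rfl, rfl⟩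
  | cons c t ih =>
    by_cases hc : c = '.'
    · subst hc
      constructor
      · have e : pvG ('.' :: t) false = '.' :: pvG t true := by simp [pvG]
        rw [e, ih.2]
      · have h2 : pvCol ('.' :: '.' :: t) = pvCol ('.' :: t) := by simp [pvCol]
        rw [h2, ← ih.2]
        simp [pvG]
    · constructor
      · simp only [pvG, if_neg hc]
        rw [ih.1, pvCol_cons_ne c t hc]
      · have e : pvCol ('.' :: c :: t) = '.' :: pvCol (c :: t) := by simp [pvCol, hc]
        rw [e, pvCol_cons_ne c t hc, ← ih.1]
        simp [pvG, hc]

theorem pvBfold (l : List Char) (acc : List Char) (pd : Bool) :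
    (l.foldl (fun (st : List Char × Bool) ch =>
        if PySem.Chars.isalpha ch || PySem.Chars.isdigit ch || ['-', '_', '.'].contains ch then
          if ch = '.' then
            ((if st.2 then st.1 else st.1 ++ ['.']), true)
          else (st.1 ++ [ch], false)
        else st) (acc, pd)).1 = acc ++ pvG (l.filter pvKeepA) pd := by
  induction l generalizing acc pd with
  | nil => simp [pvG]
  | cons c t ih =>
    simp only [List.foldl_cons, List.filter_cons]
    cases hk : pvKeepA c with
    | true =>
      have hk' : (PySem.Chars.isalpha c || PySem.Chars.isdigit c || ['-', '_', '.'].contains c) = true := hk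
      simp only [hk', if_true]
      by_cases hc : c = '.'
      · subst hc
        cases pd with
        | false =>
          simp only [ite_true, Bool.false_eq_true, if_false]
          rw [ih]
          simp [pvG]
        | true =>
          simp only [ite_true]
          rw [ih]
          simp [pvG]
      · simp only [if_neg hc]
        rw [ih]
        simp [pvG, hc]
    | false =>
      have hk' : (PySem.Chars.isalpha c || PySem.Chars.isdigit c || ['-', '_', '.'].contains c) = false := hk
      simp only [hk', Bool.false_eq_true, if_false]
      rw [ih]

theorem pvDropWhile_head {p : Char → Bool} {l : List Char} {c : Char} {t : List Char}
    (h : l.dropWhile p = c :: t) : p c = false := by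
  induction l with
  | nil => simp at h
  | cons x xs ih =>
    rw [List.dropWhile_cons] at h
    by_cases hx : p x
    · rw [if_pos hx] at h; exact ih h
    · rw [if_neg hx] at h
      cases h
      simpa using hx

theorem pvStrip_head (s : List Char) {c : Char} {t : List Char}
    (h : PySem.Chars.stripChars s ['.'] = c :: t) : c ≠ '.' := by
  rw [PySem.Chars.stripChars] at h
  set p : Char → Bool := fun x => (['.'] : List Char).contains x with hp
  cases hu : s.dropWhile p with
  | nil => rw [hu] at h; simp at h
  | cons a u' =>
    have ha : p a = false := pvDropWhile_head hu
    rw [hu] at h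
    have : (a :: u').reverse = u'.reverse ++ [a] := by simp
    rw [this, List.dropWhile_append] at h
    by_cases he : (u'.reverse.dropWhile p).isEmpty
    · rw [if_pos he] at h
      rw [List.dropWhile_cons, if_neg (by simp [ha])] at h
      simp at h
      obtain ⟨h1, -⟩ := h
      subst h1
      simpa [hp] using ha
    · rw [if_neg he] at h
      rw [List.reverse_append] at h
      simp at h
      obtain ⟨h1, -⟩ := h
      subst h1
      simpa [hp] using ha

theorem pvStrip_ne_nil_of_head (c : Char) (t : List Char) (hc : c ≠ '.') :
    PySem.Chars.stripChars (c :: t) ['.'] ≠ [] := by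
  rw [PySem.Chars.stripChars]
  set p : Char → Bool := fun x => (['.'] : List Char).contains x with hp
  have hpc : p c = false := by simp [hp, hc]
  have h1 : (c :: t).dropWhile p = c :: t := by rw [List.dropWhile_cons, if_neg (by simp [hpc])]
  rw [h1]
  intro hcon
  simp only [List.reverse_eq_nil_iff] at hcon
  have := List.dropWhile_eq_nil_iff.mp hcon c (by simp)
  rw [hpc] at this; exact absurd this (by simp)

theorem pvPad_eq (s : List Char) (hne : s ≠ []) (hlen : s.length ≤ 2) :
    pvPadLoop s 3 = s ++ List.replicate (3 - s.length)
      (match PySem.List.pyGet? s (-1) with | some c => c | none => 'a') := by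
  match s with
  | [a] =>
    have g1 : PySem.List.pyGet? [a] (-1) = some a := by
      simp [PySem.List.pyGet?, PySem.List.pyIdx?]
    have g2 : PySem.List.pyGet? [a, a] (-1) = some a := by
      simp [PySem.List.pyGet?, PySem.List.pyIdx?]
    simp [pvPadLoop, g1, g2]
  | [a, b] =>
    have g1 : PySem.List.pyGet? [a, b] (-1) = some b := by
      simp [PySem.List.pyGet?, PySem.List.pyIdx?]
    simp [pvPadLoop, g1]
  | a :: b :: c :: t => simp at hlen

theorem pvS6_ne_nil (v : List Char) (hv : v ≠ []) (hv2 : ∀ c t, v = c :: t → c ≠ '.') :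
    (if 15 < v.length then
       PySem.Chars.stripChars (PySem.List.slice v none (some 15)) ['.']
     else v) ≠ [] := by
  by_cases ht : 15 < v.length
  · rw [if_pos ht]
    match v, hv with
    | c :: t, _ =>
      have hc : c ≠ '.' := hv2 c t rfl
      rw [PySem.List.slice_to]
      · have h15 : ((15 : Int).toNat) = 15 := by decide
        rw [h15, List.take_cons (by omega : 0 < 15)]
        exact pvStrip_ne_nil_of_head c _ hc
      · decide
  · rw [if_neg ht]; exact hv

theorem pvTail_eq (w : List Char) (hne : w ≠ []) :
    (if w.length ≤ 2 then pvPadLoop w 3 else w) =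
    (if w.length ≤ 2 then
       w ++ List.replicate (3 - w.length)
         (match PySem.List.pyGet? w (-1) with | some c => c | none => 'a')
     else w) := by
  by_cases hl : w.length ≤ 2
  · rw [if_pos hl, if_pos hl]; exact pvPad_eq w hne hl
  · rw [if_neg hl, if_neg hl]

theorem solution_eq_alt (new_id : String) : solution new_id = solution_alt new_id := by
  unfold solution solution_alt
  simp only [PySem.List.foldl_append_if_eq_filter, List.nil_append, pvBfold]
  rw [pvRepLoop_eq, (pvG_eq_col _).1]
  apply congrArg String.ofList
  generalize hU : PySem.Chars.stripChars (pvCol ((PySem.Chars.lower new_id.toList).filter pvKeepA)) ['.'] = u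
  by_cases h0 : u.length = 0
  · have hnil : u = [] := List.eq_nil_of_length_eq_zero h0
    rw [if_pos h0, if_pos h0, hnil]
    have hra : PySem.Chars.replace [] [] ['a'] = ['a'] := by simp [PySem.Chars.replace]
    rw [hra]
    exact pvTail_eq _ (pvS6_ne_nil ['a'] (by simp) (by intro c t h; cases h; simp))
  · rw [if_neg h0, if_neg h0]
    exact pvTail_eq _ (pvS6_ne_nil u (fun h => h0 (by simp [h]))
      (fun c t h => pvStrip_head _ (h ▸ hU)))

-- ===== VERDICT (by name: the statement is the Claim_ definition above) =====
theorem solution_spec : Claim_equal_solution := by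
  intro new_id _
  exact solution_eq_alt new_id
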